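-- pv_equiv track=rewrite | github.com/AnaaSol/Bioinform-tica-aplicada-a-un-brote-de-brucelosis | 06_primer_design/evaluar_primers.py | basic_dimer_check
-- ===== SOURCE A (Python) =====
-- def basic_dimer_check(seq1, seq2):
--     """Chequeo muy simple de dimerización (complementos de 4 nt consecutivos)"""
--     seq1 = seq1.upper()
--     seq2 = seq2.upper()
--     complement = str.maketrans("ATGC", "TACG")
--     seq2_rc = seq2.translate(complement)[::-1]
--
--     # Ventana deslizante de 4 nt
--     for i in range(len(seq1) - 3):
--         kmer = seq1[i:i+4]
--         if kmer in seq2_rc: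
--             return True
--     return False
-- ===== SOURCE B (Python) =====
-- def basic_dimer_check(seq1, seq2):
--     """Chequeo muy simple de dimerizacion: tablas completas de 4-mers + interseccion de conjuntos"""
--     seq1 = seq1.upper()
--     seq2 = seq2.upper()
--     complement = str.maketrans("ATGC", "TACG")
--     seq2_rc = seq2.translate(complement)[::-1]
--     kmers1 = {seq1[i:i + 4] for i in range(len(seq1) - 3)}
--     kmers2 = {seq2_rc[j:j + 4] for j in range(len(seq2_rc) - 3)}
--     return bool(kmers1 & kmers2)
-- ===== Notes on version B (the rewrite author's own statement) =====
-- stated objective: alternative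
-- what changed: Replaces the early-return loop that substring-scans seq2_rc once per seq1 window with a symmetric build of both 4-mer sets (seq1 windows and seq2_rc windows) and a single set intersection.
import Mathlib
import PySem

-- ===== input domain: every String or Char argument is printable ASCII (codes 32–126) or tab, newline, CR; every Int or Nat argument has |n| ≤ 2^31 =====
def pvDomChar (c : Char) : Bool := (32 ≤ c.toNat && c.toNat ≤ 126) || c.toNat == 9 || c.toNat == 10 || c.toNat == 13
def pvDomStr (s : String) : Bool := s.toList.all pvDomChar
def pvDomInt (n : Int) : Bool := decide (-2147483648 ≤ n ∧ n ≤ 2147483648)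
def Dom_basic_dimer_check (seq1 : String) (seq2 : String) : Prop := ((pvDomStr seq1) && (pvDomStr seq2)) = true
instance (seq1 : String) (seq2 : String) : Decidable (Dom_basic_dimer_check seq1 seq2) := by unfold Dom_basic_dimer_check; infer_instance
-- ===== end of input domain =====

-- B replaces A's per-window substring scan of seq2_rc (with early return) by building both
-- 4-mer sets and intersecting them; same result, alternative decomposition (not claimed faster).

-- ===== PORT A =====
-- str.maketrans("ATGC","TACG")/translate ported by hand (exact: maps those four chars, leaves every other char unchanged)
def pvTransChar (c : Char) : Char :=
  if c = 'A' then 'T' else if c = 'T' then 'A' else if c = 'G' then 'C'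
  else if c = 'C' then 'G' else c

def basic_dimer_check (seq1 : String) (seq2 : String) : Bool :=
  let s1 := PySem.Chars.upper seq1.toList
  let s2 := PySem.Chars.upper seq2.toList
  let seq2_rc := (s2.map pvTransChar).reverse   -- seq2.translate(complement)[::-1]
  -- for i in range(len(seq1)-3): if seq1[i:i+4] in seq2_rc: return True
  (PySem.List.pyRange 0 ((s1.length : Int) - 3) 1).any (fun i =>
    PySem.Chars.isIn (PySem.List.slice s1 (some i) (some (i + 4))) seq2_rc)

-- ===== PORT B =====
def basic_dimer_check_alt (seq1 : String) (seq2 : String) : Bool :=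
  let s1 := PySem.Chars.upper seq1.toList
  let s2 := PySem.Chars.upper seq2.toList
  let seq2_rc := (s2.map pvTransChar).reverse
  let kmers1 : PySem.Set (List Char) := PySem.Set.ofList
    ((PySem.List.pyRange 0 ((s1.length : Int) - 3) 1).map (fun i =>
      PySem.List.slice s1 (some i) (some (i + 4))))
  let kmers2 : PySem.Set (List Char) := PySem.Set.ofList
    ((PySem.List.pyRange 0 ((seq2_rc.length : Int) - 3) 1).map (fun j =>
      PySem.List.slice seq2_rc (some j) (some (j + 4))))
  PySem.Set.len (PySem.Set.inter kmers1 kmers2) != 0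

-- ===== PRECONDITION & SPEC =====
def Spec_basic_dimer_check (seq1 : String) (seq2 : String) (out : Bool) : Prop := out = basic_dimer_check_alt seq1 seq2
instance (seq1 : String) (seq2 : String) (out : Bool) : Decidable (Spec_basic_dimer_check seq1 seq2 out) := by unfold Spec_basic_dimer_check; infer_instance

-- ===== CLAIM (what is proved, stated in full; the proofs are below) =====
def Claim_equal_basic_dimer_check : Prop := ∀ (seq1 : String) (seq2 : String), Dom_basic_dimer_check seq1 seq2 → Spec_basic_dimer_check seq1 seq2 (basic_dimer_check seq1 seq2)

-- ===== LEMMAS AND PROOFS =====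

-- A length-4 string occurs in s as a substring iff it equals one of s's 4-windows.
lemma pv_isIn_iff_window (s k : List Char) (hk : k.length = 4) :
    PySem.Chars.isIn k s = true ↔
      ∃ j ∈ PySem.List.pyRange 0 ((s.length : Int) - 3) 1,
        PySem.List.slice s (some j) (some (j + 4)) = k := by
  rw [← PySem.Chars.exists_prefix_drop_iff_isIn]
  constructor
  · rintro ⟨j, hpre⟩
    have hle := hpre.length_le
    rw [hk, List.length_drop] at hle
    refine ⟨(j : Int), ?_, ?_⟩
    · rw [PySem.List.mem_pyRange_one]; omega
    · have : ((j : Int) + 4) = ((j : Int) + ((4 : Nat) : Int)) := by norm_num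
      rw [this, PySem.List.slice_natCast_add]
      have := List.prefix_iff_eq_take.mp hpre
      rw [hk] at this
      exact this.symm
  · rintro ⟨i, hi, hslice⟩
    rw [PySem.List.mem_pyRange_one] at hi
    obtain ⟨h0, _⟩ := hi
    refine ⟨i.toNat, ?_⟩
    have hi4 : i + 4 = ((i.toNat : Int) + ((4 : Nat) : Int)) := by omega
    rw [show (some i) = some ((i.toNat : Int)) by simp [Int.toNat_of_nonneg h0], hi4,
      PySem.List.slice_natCast_add] at hslice
    rw [List.prefix_iff_eq_take, hk]
    exact hslice.symm

-- every seq1-window produced by the range has length 4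
lemma pv_window_len (s : List Char) (i : Int)
    (hi : i ∈ PySem.List.pyRange 0 ((s.length : Int) - 3) 1) :
    (PySem.List.slice s (some i) (some (i + 4))).length = 4 := by
  rw [PySem.List.mem_pyRange_one] at hi
  obtain ⟨h0, hlt⟩ := hi
  have hi4 : i + 4 = ((i.toNat : Int) + ((4 : Nat) : Int)) := by omega
  rw [show (some i) = some ((i.toNat : Int)) by simp [Int.toNat_of_nonneg h0], hi4,
    PySem.List.slice_natCast_add, List.length_take, List.length_drop]
  omega

-- the whole equivalence, stated over the two prepared lists
lemma pv_main (s1 rc : List Char) :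
    ((PySem.List.pyRange 0 ((s1.length : Int) - 3) 1).any (fun i =>
        PySem.Chars.isIn (PySem.List.slice s1 (some i) (some (i + 4))) rc))
    = (PySem.Set.len (PySem.Set.inter
        (PySem.Set.ofList ((PySem.List.pyRange 0 ((s1.length : Int) - 3) 1).map (fun i =>
          PySem.List.slice s1 (some i) (some (i + 4)))))
        (PySem.Set.ofList ((PySem.List.pyRange 0 ((rc.length : Int) - 3) 1).map (fun j =>
          PySem.List.slice rc (some j) (some (j + 4)))))) != 0) := by
  rw [Bool.eq_iff_iff, List.any_eq_true, bne_iff_ne, Ne, PySem.Set.len]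
  constructor
  · rintro ⟨i, hi, hIn⟩
    obtain ⟨j, hj, hje⟩ := (pv_isIn_iff_window rc _ (pv_window_len s1 i hi)).mp hIn
    intro hzero
    have hmem : PySem.List.slice s1 (some i) (some (i + 4)) ∈
        PySem.Set.inter
          (PySem.Set.ofList ((PySem.List.pyRange 0 ((s1.length : Int) - 3) 1).map (fun i =>
            PySem.List.slice s1 (some i) (some (i + 4)))))
          (PySem.Set.ofList ((PySem.List.pyRange 0 ((rc.length : Int) - 3) 1).map (fun j =>
            PySem.List.slice rc (some j) (some (j + 4))))) := by
      rw [PySem.Set.mem_inter]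
      refine ⟨?_, ?_⟩
      · rw [PySem.Set.mem_ofList, List.mem_map]; exact ⟨i, hi, rfl⟩
      · rw [PySem.Set.mem_ofList, List.mem_map]; exact ⟨j, hj, hje⟩
    have : 0 < (PySem.Set.inter
          (PySem.Set.ofList ((PySem.List.pyRange 0 ((s1.length : Int) - 3) 1).map (fun i =>
            PySem.List.slice s1 (some i) (some (i + 4)))))
          (PySem.Set.ofList ((PySem.List.pyRange 0 ((rc.length : Int) - 3) 1).map (fun j =>
            PySem.List.slice rc (some j) (some (j + 4)))))).length :=
      List.length_pos_of_mem hmem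
    omega
  · intro hne
    have hnil : (PySem.Set.inter
          (PySem.Set.ofList ((PySem.List.pyRange 0 ((s1.length : Int) - 3) 1).map (fun i =>
            PySem.List.slice s1 (some i) (some (i + 4)))))
          (PySem.Set.ofList ((PySem.List.pyRange 0 ((rc.length : Int) - 3) 1).map (fun j =>
            PySem.List.slice rc (some j) (some (j + 4)))))) ≠ [] := by
      intro h
      apply hne
      rw [h]
      rfl
    obtain ⟨x, hx⟩ := List.exists_mem_of_ne_nil _ hnil
    rw [PySem.Set.mem_inter, PySem.Set.mem_ofList, PySem.Set.mem_ofList] at hx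
    obtain ⟨hx1, hx2⟩ := hx
    rw [List.mem_map] at hx1 hx2
    obtain ⟨i, hi, hie⟩ := hx1
    obtain ⟨j, hj, hje⟩ := hx2
    refine ⟨i, hi, ?_⟩
    rw [pv_isIn_iff_window rc _ (pv_window_len s1 i hi)]
    exact ⟨j, hj, by rw [hje, hie]⟩

-- ===== VERDICT (by name: the statement is the Claim_ definition above) =====
theorem basic_dimer_check_spec : Claim_equal_basic_dimer_check := by
  intro seq1 seq2 _
  unfold Spec_basic_dimer_check basic_dimer_check basic_dimer_check_alt
  exact pv_main (PySem.Chars.upper seq1.toList)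
    (((PySem.Chars.upper seq2.toList).map pvTransChar).reverse)
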